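-- pv_equiv track=rewrite | github.com/rolansy/git-me-ai | backend/ai_agent.py | _infer_frontend_type
-- ===== SOURCE A (Python) =====
-- from typing import Dict, Tuple, List
--
-- def _infer_frontend_type(dependencies: List[str]) -> str:
--     if any('react' in dep.lower() for dep in dependencies):
--         return "React-based"
--     elif any('vue' in dep.lower() for dep in dependencies):
--         return "Vue.js"
--     elif any('angular' in dep.lower() for dep in dependencies):
--         return "Angular"
--     elif any('svelte' in dep.lower() for dep in dependencies):
--         return "Svelte"
--     else:
--         return "JavaScript"
-- ===== SOURCE B (Python) =====
-- def _infer_frontend_type(dependencies):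
--     react = vue = angular = svelte = False
--     for dep in dependencies:
--         d = dep.lower()
--         react = react or 'react' in d
--         vue = vue or 'vue' in d
--         angular = angular or 'angular' in d
--         svelte = svelte or 'svelte' in d
--     if react:
--         return "React-based"
--     if vue:
--         return "Vue.js"
--     if angular:
--         return "Angular"
--     if svelte:
--         return "Svelte"
--     return "JavaScript"
-- ===== Notes on version B (the rewrite author's own statement) =====
-- stated objective: faster
-- what changed: Replaces four separate short-circuiting any(...) scans (each re-lowercasing every dependency) with one pass that lowercases each dependency once and accumulates four presence flags, followed by a fixed-priority decision.
import Mathlib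
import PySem

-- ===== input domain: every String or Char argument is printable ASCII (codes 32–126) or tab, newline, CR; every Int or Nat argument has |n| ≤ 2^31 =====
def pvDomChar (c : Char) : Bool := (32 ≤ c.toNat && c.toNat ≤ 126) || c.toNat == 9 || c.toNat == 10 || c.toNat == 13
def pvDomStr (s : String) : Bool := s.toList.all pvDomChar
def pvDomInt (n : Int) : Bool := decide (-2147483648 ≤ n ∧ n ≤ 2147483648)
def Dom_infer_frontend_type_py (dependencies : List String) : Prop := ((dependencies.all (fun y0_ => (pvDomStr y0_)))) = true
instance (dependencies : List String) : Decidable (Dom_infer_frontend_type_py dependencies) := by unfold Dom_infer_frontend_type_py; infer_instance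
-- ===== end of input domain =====

-- B fuses A's four separate any(...) scans into one pass accumulating four presence flags,
-- then decides in fixed priority order (alternative decomposition, same result).


-- ===== PORT A =====
def infer_frontend_type_py (dependencies : List String) : String :=
  if dependencies.any (fun dep => PySem.Str.isIn "react" (PySem.Str.lower dep)) then "React-based"
  else if dependencies.any (fun dep => PySem.Str.isIn "vue" (PySem.Str.lower dep)) then "Vue.js"
  else if dependencies.any (fun dep => PySem.Str.isIn "angular" (PySem.Str.lower dep)) then "Angular"
  else if dependencies.any (fun dep => PySem.Str.isIn "svelte" (PySem.Str.lower dep)) then "Svelte"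
  else "JavaScript"

-- ===== PORT B =====
def infer_frontend_type_py_alt (dependencies : List String) : String :=
  let flags : Bool × Bool × Bool × Bool :=
    dependencies.foldl (fun st dep =>
      let d := PySem.Str.lower dep
      (st.1 || PySem.Str.isIn "react" d,
       st.2.1 || PySem.Str.isIn "vue" d,
       st.2.2.1 || PySem.Str.isIn "angular" d,
       st.2.2.2 || PySem.Str.isIn "svelte" d)) (false, false, false, false)
  if flags.1 then "React-based"
  else if flags.2.1 then "Vue.js"
  else if flags.2.2.1 then "Angular"
  else if flags.2.2.2 then "Svelte"
  else "JavaScript"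

-- ===== PRECONDITION & SPEC =====
def Spec_infer_frontend_type_py (dependencies : List String) (out : String) : Prop := out = infer_frontend_type_py_alt dependencies
instance (dependencies : List String) (out : String) : Decidable (Spec_infer_frontend_type_py dependencies out) := by unfold Spec_infer_frontend_type_py; infer_instance

-- ===== CLAIM (what is proved, stated in full; the proofs are below) =====
def Claim_equal_infer_frontend_type_py : Prop := ∀ (dependencies : List String), Dom_infer_frontend_type_py dependencies → Spec_infer_frontend_type_py dependencies (infer_frontend_type_py dependencies)

-- ===== LEMMAS AND PROOFS =====

-- The one-pass fold computes exactly the four `any` results, or-ed with theinitial accumulator.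
theorem pv_flags_eq (deps : List String) (st : Bool × Bool × Bool × Bool) :
    deps.foldl (fun st dep =>
      let d := PySem.Str.lower dep
      (st.1 || PySem.Str.isIn "react" d,
       st.2.1 || PySem.Str.isIn "vue" d,
       st.2.2.1 || PySem.Str.isIn "angular" d,
       st.2.2.2 || PySem.Str.isIn "svelte" d)) st =
    (st.1 || deps.any (fun dep => PySem.Str.isIn "react" (PySem.Str.lower dep)),
     st.2.1 || deps.any (fun dep => PySem.Str.isIn "vue" (PySem.Str.lower dep)),
     st.2.2.1 || deps.any (fun dep => PySem.Str.isIn "angular" (PySem.Str.lower dep)),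
     st.2.2.2 || deps.any (fun dep => PySem.Str.isIn "svelte" (PySem.Str.lower dep))) := by
  induction deps generalizing st with
  | nil => simp
  | cons h t ih =>
      simp only [List.foldl_cons, List.any_cons, ih]
      simp [Bool.or_assoc]

-- ===== VERDICT (by name: the statement is the Claim_ definition above) =====
theorem infer_frontend_type_py_spec : Claim_equal_infer_frontend_type_py := by
  intro deps _
  unfold Spec_infer_frontend_type_py infer_frontend_type_py infer_frontend_type_py_alt
  rw [pv_flags_eq]
  simp
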